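-- pv_equiv track=rewrite | github.com/TangJayce/PaperProgram | run.py | get_parent_k
-- ===== SOURCE A (Python) =====
-- m = 3   # 配送中心数量
--
-- n = 12  # 需求点数量
--
-- djk = [     # 备选配送中心与客户需求点的距离
--     [10.8, 12.2, 10.4, 12.4, 17.2, 23.8, 20.6, 21.4, 23.4, 31.6, 23, 24.6],
--     [19.6, 13.4, 9.8, 5.2, 8.4, 17.6, 9, 11.8, 15.4, 20.1, 6.6, 8],
--     [24, 21.4, 24.6, 26.4, 19.4, 10.2, 18, 15.2, 12.8, 10.2, 30.4, 29.6]
-- ]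
--
-- def get_parent_k(chromosome: list) -> list:
--     """获取需求点是否哪个配送中心配送的"""
--     parent_k = [-1 for _ in range(n)]
--     for k in range(n):
--         d = -1
--         idx = -1
--         for j in range(m):
--             if chromosome[j] > 0:
--                 if d < 0 or djk[j][k] < d:
--                     d = djk[j][k]
--                     idx = j
--         parent_k[k] = idx
--     return parent_k
-- ===== SOURCE B (Python) =====
-- m = 3   # number of centers
-- n = 12  # number of demand points
-- djk = [
--     [10.8, 12.2, 10.4, 12.4, 17.2, 23.8, 20.6, 21.4, 23.4, 31.6, 23, 24.6],
--     [19.6, 13.4, 9.8, 5.2, 8.4, 17.6, 9, 11.8, 15.4, 20.1, 6.6, 8],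
--     [24, 21.4, 24.6, 26.4, 19.4, 10.2, 18, 15.2, 12.8, 10.2, 30.4, 29.6]
-- ]
--
-- # Precomputed once per module load: for each demand point, its centers ranked by
-- # distance (stable sort => earliest center wins ties, matching strict-< argmin).
-- pref = [sorted(range(m), key=lambda j: djk[j][k]) for k in range(n)]
--
-- def get_parent_k(chromosome: list) -> list:
--     """Assign each point to the first OPEN center in its precomputed
--     distance-ranked preference list; -1 if no center is open.
--     No distance is inspected at call time."""
--     return [next((j for j in p if chromosome[j] > 0), -1) for p in pref]
-- ===== Notes on version B (the rewrite author's own statement) =====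
-- stated objective: alternative
-- what changed: B replaces the per-point argmin over distances by a precomputed preference table (each point's centers stably sorted by distance once at module load); a call only takes, per point, the first open center of its preference list, so no distance comparison happens at call time.
import Mathlib
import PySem

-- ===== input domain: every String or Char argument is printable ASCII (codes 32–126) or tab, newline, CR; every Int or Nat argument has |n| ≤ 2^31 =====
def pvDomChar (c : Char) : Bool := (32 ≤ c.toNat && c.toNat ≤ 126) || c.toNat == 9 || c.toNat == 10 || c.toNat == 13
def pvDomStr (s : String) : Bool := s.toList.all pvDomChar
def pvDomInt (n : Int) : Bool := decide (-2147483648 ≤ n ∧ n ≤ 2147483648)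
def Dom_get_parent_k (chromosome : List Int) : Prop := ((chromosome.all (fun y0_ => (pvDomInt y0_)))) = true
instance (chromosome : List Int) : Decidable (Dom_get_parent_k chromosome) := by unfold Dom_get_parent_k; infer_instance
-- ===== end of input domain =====

-- B precomputes, per demand point, its centers sorted by distance once, and at call time takes the
-- first open center of each preference list; A scans all distances per point on every call.
-- The module's float distances all have one decimal digit, so they are ported scaled ×10 as Ints;
-- this is exact for the comparisons/sorting the algorithms perform (only the order of distances matters).

-- ===== PORT A =====
def pvDjk : List (List Int) :=
  [[108, 122, 104, 124, 172, 238, 206, 214, 234, 316, 230, 246],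
   [196, 134, 98, 52, 84, 176, 90, 118, 154, 201, 66, 80],
   [240, 214, 246, 264, 194, 102, 180, 152, 128, 102, 304, 296]]

def get_parent_k (chromosome : List Int) : List Int :=
  -- for k in range(n): inner scan over j in range(m); parent_k[k] = idx
  (PySem.List.pyRange 0 12 1).map (fun k =>
    let s := (PySem.List.pyRange 0 3 1).foldl (fun (di : Int × Int) j =>
      if chromosome.getD j.toNat 0 > 0 then
        let v := (pvDjk.getD j.toNat []).getD k.toNat 0
        if di.1 < 0 ∨ v < di.1 then (v, j) else di
      else di) (-1, -1)
    s.2)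

-- ===== PORT B =====
-- pref = [sorted(range(m), key=lambda j: djk[j][k]) for k in range(n)]  (module-level, computed once)
def pvPref : List (List Int) :=
  (PySem.List.pyRange 0 12 1).map (fun k =>
    PySem.List.sorted (PySem.List.pyRange 0 3 1)
      (fun j => (pvDjk.getD j.toNat []).getD k.toNat 0) false)

def get_parent_k_alt (chromosome : List Int) : List Int :=
  -- [next((j for j in p if chromosome[j] > 0), -1) for p in pref]
  pvPref.map (fun p =>
    match p.find? (fun j => chromosome.getD j.toNat 0 > 0) with
    | some j => j
    | none => -1)

-- ===== PRECONDITION & SPEC =====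
-- Pre_ excludes chromosomes with fewer than 3 entries, on which Python A raises IndexError at chromosome[j].
def Pre_get_parent_k (chromosome : List Int) : Prop := 3 ≤ chromosome.length
instance (chromosome : List Int) : Decidable (Pre_get_parent_k chromosome) := by
  unfold Pre_get_parent_k; infer_instance
def pvWitness_get_parent_k : List Int := [1, 0, 1]

def Spec_get_parent_k (chromosome : List Int) (out : List Int) : Prop := out = get_parent_k_alt chromosome
instance (chromosome : List Int) (out : List Int) : Decidable (Spec_get_parent_k chromosome out) := by unfold Spec_get_parent_k; infer_instance

-- ===== CLAIM (what is proved, stated in full; the proofs are below) =====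
def Claim_equal_get_parent_k : Prop := ∀ (chromosome : List Int), Dom_get_parent_k chromosome → Pre_get_parent_k chromosome → Spec_get_parent_k chromosome (get_parent_k chromosome)

-- ===== LEMMAS AND PROOFS =====

-- Both ports' results depend on the chromosome only through the signs of its first three entries.
lemma ports_agree (c : List Int) :
    get_parent_k c = get_parent_k_alt c := by
  have hp : pvPref = [[0,1,2],[0,1,2],[1,0,2],[1,0,2],[1,0,2],[2,1,0],
                      [1,2,0],[1,2,0],[2,1,0],[2,1,0],[1,0,2],[1,0,2]] := by decide
  by_cases h0 : c.getD 0 0 > 0 <;>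
    by_cases h1 : c.getD 1 0 > 0 <;>
      by_cases h2 : c.getD 2 0 > 0 <;>
        simp only [get_parent_k, get_parent_k_alt, hp,
          show PySem.List.pyRange 0 3 1 = [0, 1, 2] from by decide,
          show PySem.List.pyRange 0 12 1 = [0,1,2,3,4,5,6,7,8,9,10,11] from by decide,
          List.foldl, List.map, List.find?, Int.toNat,
          h0, h1, h2, decide_true, decide_false, if_true, if_false] <;> decide

-- ===== VERDICT (by name: the statement is the Claim_ definition above) =====
theorem get_parent_k_spec : Claim_equal_get_parent_k := by
  intro c _ _
  unfold Spec_get_parent_k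
  exact ports_agree c
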